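-- pv_equiv track=rewrite | github.com/mikhail-dvorkin/competitions | yandex/y2017/warmup/C.py | solve
-- ===== SOURCE A (Python) =====
-- def solve(a):
-- 	n = len(a)
-- 	a.sort()
-- 	i = 0
-- 	ans = 0
-- 	while i < n:
-- 		ans += 1
-- 		if i + 1 < n and a[i + 1] <= a[i] + 2:
-- 			i += 2
-- 			continue
-- 		i += 1
-- 	return ans
-- ===== SOURCE B (Python) =====
-- def solve(a):
-- 	a.sort()
-- 	if not a:
-- 		return 0
-- 	# split sorted array into maximal runs where consecutive gaps are <= 2,
-- 	# then each run of length k contributes ceil(k/2) groups (closed form)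
-- 	runs = [1]
-- 	for prev, x in zip(a, a[1:]):
-- 		if x - prev > 2:
-- 			runs.append(1)
-- 		else:
-- 			runs[-1] += 1
-- 	return sum((r + 1) // 2 for r in runs)
-- ===== Notes on version B (the rewrite author's own statement) =====
-- stated objective: alternative
-- what changed: Instead of simulating the greedy pairing with an index-jumping loop, B splits the sorted list into maximal runs whose adjacent gaps are at most 2 and sums the closed form ceil(k/2) over the run lengths.
import Mathlib
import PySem

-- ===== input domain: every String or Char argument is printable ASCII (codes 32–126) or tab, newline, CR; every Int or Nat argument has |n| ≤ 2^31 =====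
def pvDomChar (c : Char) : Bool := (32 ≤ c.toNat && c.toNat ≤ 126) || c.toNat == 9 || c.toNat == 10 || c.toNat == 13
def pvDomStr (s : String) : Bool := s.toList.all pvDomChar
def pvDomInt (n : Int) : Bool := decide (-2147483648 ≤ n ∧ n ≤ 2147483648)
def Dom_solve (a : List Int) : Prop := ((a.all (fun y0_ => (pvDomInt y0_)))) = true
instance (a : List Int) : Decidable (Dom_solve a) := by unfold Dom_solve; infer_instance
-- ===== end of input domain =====

-- B replaces A's greedy pairing simulation by a staged computation: split the sorted list
-- into maximal runs with adjacent gaps ≤ 2, then sum the closed form ceil(k/2) per run.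
-- Both Pythons sort `a` in place (observable by the caller); the equivalence proved here
-- is about the return value.

-- ===== PORT A =====
-- the while loop: i jumps by 2 when a pair is formed, else by 1
def solveLoopA (s : List Int) (n i : Nat) (ans : Int) : Int :=
  if i < n then
    -- a[i], a[i+1]: indices are in range here, so pyGet? is some; getD 0 only discharges the Option
    if i + 1 < n ∧ (PySem.List.pyGet? s ((i : Int) + 1)).getD 0 ≤ (PySem.List.pyGet? s (i : Int)).getD 0 + 2 then
      solveLoopA s n (i + 2) (ans + 1)
    else
      solveLoopA s n (i + 1) (ans + 1)
  else ans
termination_by n - i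

def solve (a : List Int) : Int :=
  let n := a.length
  let s := PySem.List.sorted a (fun x => x) false
  solveLoopA s n 0 0

-- ===== PORT B =====
-- runs[-1] += 1 (the runs list is never empty in Source B)
def bumpLast : List Int → List Int
  | [] => []
  | [c] => [c + 1]
  | x :: xs => x :: bumpLast xs

def solve_alt (a : List Int) : Int :=
  let s := PySem.List.sorted a (fun x => x) false
  match s with
  | [] => 0
  | _ :: rest =>
    let runs := (s.zip rest).foldl
      (fun (runs : List Int) (p : Int × Int) =>
        if p.2 - p.1 > 2 then runs ++ [1] else bumpLast runs) [1]
    (runs.map (fun r => PySem.Int.floordiv (r + 1) 2)).sum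

-- ===== PRECONDITION & SPEC =====
def Spec_solve (a : List Int) (out : Int) : Prop := out = solve_alt a
instance (a : List Int) (out : Int) : Decidable (Spec_solve a out) := by unfold Spec_solve; infer_instance

-- ===== CLAIM (what is proved, stated in full; the proofs are below) =====
def Claim_equal_solve : Prop := ∀ (a : List Int), Dom_solve a → Spec_solve a (solve a)

-- ===== LEMMAS AND PROOFS =====

-- abstract recursion A's loop reduces to
def greedy : List Int → Int → Int
  | [], ans => ans
  | [_], ans => ans + 1
  | x :: y :: rest, ans => if y ≤ x + 2 then greedy rest (ans + 1) else greedy (y :: rest) (ans + 1)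

-- run lengths of the maximal gap-≤2 runs (front-to-back)
def runLens : List Int → List Int
  | [] => []
  | [_] => [1]
  | x :: y :: t =>
    if y - x > 2 then 1 :: runLens (y :: t)
    else
      match runLens (y :: t) with
      | k :: ks => (k + 1) :: ks
      | [] => [1]

def ceil2 (k : Int) : Int := PySem.Int.floordiv (k + 1) 2

def S (l : List Int) : Int := ((runLens l).map ceil2).sum

def stepB (runs : List Int) (p : Int × Int) : List Int :=
  if p.2 - p.1 > 2 then runs ++ [1] else bumpLast runs

def addHead (d : Int) : List Int → List Int
  | [] => []
  | k :: ks => (k + d) :: ks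

lemma runLens_cons_ne_nil (x : Int) (t : List Int) : runLens (x :: t) ≠ [] := by
  cases t with
  | nil => simp [runLens]
  | cons y t' =>
    rw [runLens]
    split_ifs
    · simp
    · cases runLens (y :: t') <;> simp

lemma addHead_zero (l : List Int) : addHead 0 l = l := by
  cases l <;> simp [addHead]

lemma ceil2_add_two (k : Int) : ceil2 (k + 2) = ceil2 k + 1 := by
  unfold ceil2
  rw [PySem.Int.floordiv_eq_ediv_of_pos (by norm_num),
      PySem.Int.floordiv_eq_ediv_of_pos (by norm_num)]
  have h : k + 2 + 1 = k + 1 + 1 * 2 := by ring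
  rw [h, Int.add_mul_ediv_right _ _ (by norm_num : (2:Int) ≠ 0)]

lemma ceil2_one : ceil2 1 = 1 := by decide

lemma ceil2_two : ceil2 2 = 1 := by decide

lemma S_break {x y : Int} (t : List Int) (h : y - x > 2) :
    S (x :: y :: t) = 1 + S (y :: t) := by
  unfold S
  rw [runLens, if_pos h]
  simp [ceil2_one]

lemma S_pair {x y : Int} (t : List Int) (h : ¬ y - x > 2) :
    S (x :: y :: t) = 1 + S t := by
  cases t with
  | nil =>
    simp [S, runLens, h, ceil2_two]
  | cons z t' =>
    unfold S
    rw [runLens, if_neg h]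
    by_cases h2 : z - y > 2
    · rw [runLens, if_pos h2]
      simp [ceil2_two]
    · rw [runLens, if_neg h2]
      obtain ⟨k, ks, hk⟩ := List.exists_cons_of_ne_nil (runLens_cons_ne_nil z t')
      rw [hk]
      simp only [List.map_cons, List.sum_cons]
      have : k + 1 + 1 = k + 2 := by ring
      rw [this, ceil2_add_two]
      ring

lemma greedy_eq_S (l : List Int) (ans : Int) : greedy l ans = ans + S l := by
  match l with
  | [] => simp [greedy, S, runLens]
  | [x] => simp [greedy, S, runLens, ceil2_one]
  | x :: y :: t =>
    by_cases hle : y ≤ x + 2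
    · rw [greedy, if_pos hle, greedy_eq_S t (ans + 1), S_pair t (by omega)]
      ring
    · rw [greedy, if_neg hle, greedy_eq_S (y :: t) (ans + 1), S_break t (by omega)]
      ring

lemma loopA_eq_greedy (s : List Int) (i : Nat) (ans : Int) :
    solveLoopA s s.length i ans = greedy (s.drop i) ans := by
  by_cases h : i < s.length
  · have hx : PySem.List.pyGet? s (i : Int) = some s[i] := PySem.List.pyGet?_ofNat s i h
    have hdrop : s.drop i = s[i] :: s.drop (i + 1) := List.drop_eq_getElem_cons h
    by_cases h2 : i + 1 < s.length
    · have hy : PySem.List.pyGet? s ((i : Int) + 1) = some s[i+1] := by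
        have := PySem.List.pyGet?_ofNat (xs := s) (n := i + 1) h2
        simpa using this
      have hdrop2 : s.drop (i + 1) = s[i+1] :: s.drop (i + 2) := List.drop_eq_getElem_cons h2
      by_cases hle : s[i+1] ≤ s[i] + 2
      · rw [solveLoopA]
        simp only [h, if_pos, hx, hy, Option.getD_some]
        rw [if_pos ⟨h2, hle⟩, loopA_eq_greedy s (i + 2) (ans + 1), hdrop, hdrop2, greedy,
          if_pos hle]
      · rw [solveLoopA]
        simp only [h, if_pos, hx, hy, Option.getD_some]
        rw [if_neg (by simp [hle]), loopA_eq_greedy s (i + 1) (ans + 1), hdrop, hdrop2, greedy,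
          if_neg hle]
    · rw [solveLoopA]
      simp only [h, if_pos]
      rw [if_neg (by simp [h2]), loopA_eq_greedy s (i + 1) (ans + 1), hdrop]
      have : s.drop (i + 1) = [] := List.drop_eq_nil_of_le (by omega)
      rw [this]
      simp [greedy]
  · have h1 : s.drop i = [] := List.drop_eq_nil_of_le (by omega)
    rw [solveLoopA, if_neg h, h1, greedy]
termination_by s.length - i

lemma bumpLast_append (acc : List Int) (c : Int) :
    bumpLast (acc ++ [c]) = acc ++ [c + 1] := by
  induction acc with
  | nil => rfl
  | cons a l ih =>
    cases l with
    | nil => simp [bumpLast]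
    | cons b l' => simpa [bumpLast] using ih

lemma fold_runs (t : List Int) : ∀ (x : Int) (acc : List Int) (c : Int),
    ((x :: t).zip t).foldl stepB (acc ++ [c]) = acc ++ addHead (c - 1) (runLens (x :: t)) := by
  induction t with
  | nil =>
    intro x acc c
    simp [runLens, addHead]
  | cons y t' ih =>
    intro x acc c
    have hzip : ((x :: y :: t').zip (y :: t')) = (x, y) :: ((y :: t').zip t') := rfl
    rw [hzip, List.foldl_cons]
    by_cases h : y - x > 2
    · have hstep : stepB (acc ++ [c]) (x, y) = (acc ++ [c]) ++ [1] := by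
        simp [stepB, h]
      rw [hstep, ih y (acc ++ [c]) 1]
      obtain ⟨k, ks, hk⟩ := List.exists_cons_of_ne_nil (runLens_cons_ne_nil y t')
      rw [runLens, if_pos h, hk]
      simp [addHead]
    · have hstep : stepB (acc ++ [c]) (x, y) = acc ++ [c + 1] := by
        simp [stepB, h, bumpLast_append]
      rw [hstep, ih y acc (c + 1)]
      obtain ⟨k, ks, hk⟩ := List.exists_cons_of_ne_nil (runLens_cons_ne_nil y t')
      rw [runLens, if_neg h, hk]
      simp [addHead]

lemma solve_alt_eq_S (a : List Int) : solve_alt a = S (PySem.List.sorted a (fun x => x) false) := by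
  unfold solve_alt
  cases hs : PySem.List.sorted a (fun x => x) false with
  | nil => simp [S, runLens]
  | cons x rest =>
    have hruns : ((x :: rest).zip rest).foldl stepB [1] = runLens (x :: rest) := by
      have h := fold_runs rest x [] 1
      simpa [addHead_zero] using h
    show ((((x :: rest).zip rest).foldl stepB [1]).map ceil2).sum = S (x :: rest)
    rw [hruns]
    rfl

-- ===== VERDICT (by name: the statement is the Claim_ definition above) =====
theorem solve_spec : Claim_equal_solve := by
  intro a _
  unfold Spec_solve
  rw [solve_alt_eq_S]
  show solveLoopA (PySem.List.sorted a (fun x => x) false) a.length 0 0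
      = S (PySem.List.sorted a (fun x => x) false)
  have hlen : (PySem.List.sorted a (fun x => x) false).length = a.length :=
    PySem.List.length_sorted a _ _
  rw [← hlen, loopA_eq_greedy, List.drop_zero, greedy_eq_S]
  ring
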